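-- pv_equiv track=rewrite | github.com/r2dt-bio/R2DT | utils/fr3d.py | remap_dot_bracket
-- ===== SOURCE A (Python) =====
-- from typing import Dict, List, Optional, Set, Tuple
--
-- def remap_dot_bracket(
--     resolved_dot_bracket: str,
--     resolved_mask: List[bool],
-- ) -> str:
--     """
--     Expand a dot-bracket string from resolved-only indexing to full-sequence indexing.
--
--     Inserts ``'.'`` at every unresolved position so the result has the same
--     length as the full deposited sequence.
--
--     Args:
--         resolved_dot_bracket: Dot-bracket from base-pair extraction (covers
--             only resolved nucleotides).
--         resolved_mask: Boolean list for the full sequence (``True`` = resolved).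
--
--     Returns:
--         Expanded dot-bracket string with ``len(resolved_mask)`` characters.
--
--     Raises:
--         ValueError: If the number of ``True`` values in *resolved_mask*
--             doesn't match *len(resolved_dot_bracket)*.
--     """
--     resolved_count = sum(resolved_mask)
--     if resolved_count != len(resolved_dot_bracket):
--         raise ValueError(
--             f"Resolved count ({resolved_count}) != "
--             f"dot-bracket length ({len(resolved_dot_bracket)})"
--         )
--
--     result = []
--     res_idx = 0
--     for is_resolved in resolved_mask:
--         if is_resolved:
--             result.append(resolved_dot_bracket[res_idx])
--             res_idx += 1
--         else:
--             result.append(".")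
--     return "".join(result)
-- ===== SOURCE B (Python) =====
-- def remap_dot_bracket(
--     resolved_dot_bracket: str,
--     resolved_mask,
-- ) -> str:
--     resolved_count = sum(resolved_mask)
--     if resolved_count != len(resolved_dot_bracket):
--         raise ValueError(
--             f"Resolved count ({resolved_count}) != "
--             f"dot-bracket length ({len(resolved_dot_bracket)})"
--         )
--     # Run-length strategy: split the mask into maximal runs of equal flags and
--     # emit whole chunks — a slice of the dot-bracket for a resolved run, a
--     # '.'-repetition for an unresolved run.
--     pieces = []
--     taken = 0
--     j = 0
--     n = len(resolved_mask)
--     while j < n: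
--         k = j + 1
--         while k < n and resolved_mask[k] == resolved_mask[j]:
--             k += 1
--         run = k - j
--         if resolved_mask[j]:
--             pieces.append(resolved_dot_bracket[taken:taken + run])
--             taken += run
--         else:
--             pieces.append('.' * run)
--         j = k
--     return ''.join(pieces)
-- ===== Notes on version B (the rewrite author's own statement) =====
-- stated objective: alternative
-- what changed: Replaces A's per-character consume-loop (running res_idx) by a run-length algorithm: split the mask into maximal runs of equal flags and emit whole chunks, a dot-bracket slice per resolved run and a '.'-repetition per unresolved run.
import Mathlib
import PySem

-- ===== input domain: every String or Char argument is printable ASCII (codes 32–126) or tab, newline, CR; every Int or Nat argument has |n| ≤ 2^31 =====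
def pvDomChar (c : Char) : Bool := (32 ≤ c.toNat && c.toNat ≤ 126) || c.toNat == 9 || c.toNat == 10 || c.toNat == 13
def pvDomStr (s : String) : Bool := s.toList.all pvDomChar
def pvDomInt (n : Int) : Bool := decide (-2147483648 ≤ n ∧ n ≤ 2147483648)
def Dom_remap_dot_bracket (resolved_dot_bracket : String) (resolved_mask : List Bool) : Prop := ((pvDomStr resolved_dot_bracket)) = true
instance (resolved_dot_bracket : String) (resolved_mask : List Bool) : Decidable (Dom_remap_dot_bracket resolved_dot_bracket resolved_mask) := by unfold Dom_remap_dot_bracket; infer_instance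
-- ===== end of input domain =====

-- B replaces A's per-character consume-loop by a run-length chunk strategy: split the mask into
-- maximal runs of equal flags and emit a whole dot-bracket slice per resolved run and a whole
-- '.'-repetition per unresolved run; equal return values proved on Pre_.

-- ===== PORT A =====
-- A raises ValueError when sum(resolved_mask) ≠ len(resolved_dot_bracket); those inputs are
-- excluded by Pre_. Under Pre_ the running index is always in range, so the getD default is never used.
def remap_dot_bracket (resolved_dot_bracket : String) (resolved_mask : List Bool) : String :=
  let cs := resolved_dot_bracket.toList
  String.ofList (resolved_mask.foldl
    (fun st b =>
      if b then (st.1 ++ [PySem.List.pyGetD cs (st.2 : Int) '.'], st.2 + 1)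
      else (st.1 ++ ['.'], st.2))
    (([] : List Char), (0 : Nat))).1

-- ===== PORT B =====
-- The inner `while` that advances k to the end of the current run is ported as
-- takeWhile/dropWhile on the rest of the mask: run = length of the maximal equal-flag run.
def remap_dot_bracket_altGo (cs : List Char) : List Bool → Nat → List Char
  | [], _ => []
  | b :: m, taken =>
    let run := (m.takeWhile (fun x => x == b)).length + 1
    let rest := m.dropWhile (fun x => x == b)
    if b then
      PySem.List.slice cs (some (taken : Int)) (some ((taken : Int) + (run : Int))) ++
        remap_dot_bracket_altGo cs rest (taken + run)
    else
      List.replicate run '.' ++ remap_dot_bracket_altGo cs rest taken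
termination_by m => m.length
decreasing_by all_goals
  exact Nat.lt_succ_of_le (List.length_dropWhile_le _ _)

def remap_dot_bracket_alt (resolved_dot_bracket : String) (resolved_mask : List Bool) : String :=
  String.ofList (remap_dot_bracket_altGo resolved_dot_bracket.toList resolved_mask 0)

-- ===== PRECONDITION & SPEC =====
-- Pre_ excludes exactly the inputs where the Python (both A and B) raises ValueError:
-- the number of True entries in the mask must equal the dot-bracket length.
def Pre_remap_dot_bracket (resolved_dot_bracket : String) (resolved_mask : List Bool) : Prop :=
  resolved_mask.countP (fun b => b) = resolved_dot_bracket.toList.length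
instance (resolved_dot_bracket : String) (resolved_mask : List Bool) : Decidable (Pre_remap_dot_bracket resolved_dot_bracket resolved_mask) := by unfold Pre_remap_dot_bracket; infer_instance
def pvWitness_remap_dot_bracket : String × List Bool := ("()", [true, false, true])

def Spec_remap_dot_bracket (resolved_dot_bracket : String) (resolved_mask : List Bool) (out : String) : Prop := out = remap_dot_bracket_alt resolved_dot_bracket resolved_mask
instance (resolved_dot_bracket : String) (resolved_mask : List Bool) (out : String) : Decidable (Spec_remap_dot_bracket resolved_dot_bracket resolved_mask out) := by unfold Spec_remap_dot_bracket; infer_instance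

-- ===== CLAIM (what is proved, stated in full; the proofs are below) =====
def Claim_equal_remap_dot_bracket : Prop := ∀ (resolved_dot_bracket : String) (resolved_mask : List Bool), Dom_remap_dot_bracket resolved_dot_bracket resolved_mask → Pre_remap_dot_bracket resolved_dot_bracket resolved_mask → Spec_remap_dot_bracket resolved_dot_bracket resolved_mask (remap_dot_bracket resolved_dot_bracket resolved_mask)

-- ===== LEMMAS AND PROOFS =====

-- Common characterisation: the expanded dot-bracket as a structural recursion on the mask.
def pvExpand : List Bool → List Char → List Char
  | [], _ => []
  | false :: m, cs => '.' :: pvExpand m cs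
  | true :: _, [] => []          -- unreachable under the count condition
  | true :: m, c :: cs => c :: pvExpand m cs

-- A's loop, generalized over accumulator and running index.
lemma pvA_loop (m : List Bool) (cs : List Char) (acc : List Char) (i : Nat)
    (h : i + m.countP (fun b => b) ≤ cs.length) :
    (m.foldl
      (fun st b =>
        if b then (st.1 ++ [PySem.List.pyGetD cs (st.2 : Int) '.'], st.2 + 1)
        else (st.1 ++ ['.'], st.2))
      (acc, i)).1 = acc ++ pvExpand m (cs.drop i) := by
  induction m generalizing acc i with
  | nil => simp [pvExpand]
  | cons b m ih =>
    cases b with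
    | true =>
      have hi : i < cs.length := by simp at h; omega
      have hget : PySem.List.pyGetD cs (i : Int) '.' = cs[i] := by
        simp [PySem.List.pyGetD_natCast, hi]
      have hdrop : cs.drop i = cs[i] :: cs.drop (i + 1) := List.drop_eq_getElem_cons hi
      have hrec := ih (acc ++ [cs[i]]) (i + 1) (by simp at h; omega)
      rw [List.foldl_cons, if_pos rfl, hget, hrec, hdrop]
      simp [pvExpand]
    | false =>
      have hrec := ih (acc ++ ['.']) i (by simp at h; omega)
      rw [List.foldl_cons, if_neg (by simp), hrec]
      simp [pvExpand]

-- Expansion over a maximal run of unresolved positions.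
lemma pvExpand_false_run (r : Nat) (rest : List Bool) (cs : List Char) :
    pvExpand (List.replicate r false ++ rest) cs = List.replicate r '.' ++ pvExpand rest cs := by
  induction r with
  | zero => simp
  | succ r ih => simp [List.replicate_succ, pvExpand, ih]

-- Expansion over a maximal run of resolved positions consumes exactly that many characters.
lemma pvExpand_true_run (r : Nat) (rest : List Bool) (cs : List Char) (h : r ≤ cs.length) :
    pvExpand (List.replicate r true ++ rest) cs = cs.take r ++ pvExpand rest (cs.drop r) := by
  induction r generalizing cs with
  | zero => simp
  | succ r ih =>
    cases cs with
    | nil => simp at h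
    | cons c cs =>
      simp only [List.replicate_succ, List.cons_append, pvExpand, List.take_succ_cons,
        List.drop_succ_cons]
      rw [ih cs (by simp at h; omega)]

-- The head run of a mask is a replicate block.
lemma pvRun_decomp (b : Bool) (m : List Bool) :
    b :: m = List.replicate ((m.takeWhile (fun x => x == b)).length + 1) b
      ++ m.dropWhile (fun x => x == b) := by
  have ht : m.takeWhile (fun x => x == b)
      = List.replicate (m.takeWhile (fun x => x == b)).length b := by
    apply List.eq_replicate_of_mem
    intro x hx
    have := List.mem_takeWhile_imp hx
    simpa using this
  calc b :: m = b :: (m.takeWhile (fun x => x == b) ++ m.dropWhile (fun x => x == b)) := by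
        rw [List.takeWhile_append_dropWhile]
    _ = _ := by
        rw [List.replicate_succ, List.cons_append]
        conv_lhs => rw [ht]

-- B's run-length recursion computes the expansion (strong induction on the mask length,
-- since each step consumes a whole run).
lemma pvB_go (n : Nat) : ∀ (m : List Bool), m.length ≤ n → ∀ (cs : List Char) (taken : Nat),
    taken + m.countP (fun b => b) ≤ cs.length →
    remap_dot_bracket_altGo cs m taken = pvExpand m (cs.drop taken) := by
  induction n with
  | zero =>
    intro m hm cs taken _
    have : m = [] := List.eq_nil_of_length_eq_zero (Nat.le_zero.mp hm)
    subst this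
    simp [remap_dot_bracket_altGo, pvExpand]
  | succ n ih =>
    intro m hm cs taken h
    match m, hm, h with
    | [], _, _ => simp [remap_dot_bracket_altGo, pvExpand]
    | true :: m', hm, h =>
      have hdecomp := pvRun_decomp true m'
      have hcount : (true :: m').countP (fun b => b)
          = ((m'.takeWhile (fun x => x == true)).length + 1)
            + (m'.dropWhile (fun x => x == true)).countP (fun b => b) := by
        conv_lhs => rw [hdecomp]
        simp [List.countP_append, List.countP_replicate]
      rw [remap_dot_bracket_altGo]
      set r := (m'.takeWhile (fun x => x == true)).length + 1 with hr
      set d := m'.dropWhile (fun x => x == true) with hd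
      have hslice : PySem.List.slice cs (some (taken : Int)) (some ((taken : Int) + (r : Int)))
          = (cs.drop taken).take r := PySem.List.slice_natCast_add cs taken r
      have hdlen : d.length ≤ n := by
        have h1 : d.length ≤ m'.length := hd ▸ List.length_dropWhile_le _ m'
        have h2 : m'.length + 1 ≤ n + 1 := by simpa using hm
        omega
      rw [hslice, ih d hdlen cs (taken + r) (by rw [hcount] at h; omega)]
      conv_rhs => rw [hdecomp]
      rw [pvExpand_true_run r d (cs.drop taken) (by simp; rw [hcount] at h; omega)]
      simp [List.drop_drop]
    | false :: m', hm, h =>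
      have hdecomp := pvRun_decomp false m'
      have hcount : (false :: m').countP (fun b => b)
          = (m'.dropWhile (fun x => x == false)).countP (fun b => b) := by
        conv_lhs => rw [hdecomp]
        simp [List.countP_append, List.countP_replicate]
      rw [remap_dot_bracket_altGo]
      simp only [Bool.false_eq_true, if_false]
      have hdlen : (m'.dropWhile (fun x => x == false)).length ≤ n := by
        have := List.length_dropWhile_le (fun x => x == false) m'
        simp at hm; omega
      rw [ih _ hdlen cs taken (by rw [hcount] at h; omega)]
      conv_rhs => rw [hdecomp]
      rw [pvExpand_false_run]

-- ===== VERDICT (by name: the statement is the Claim_ definition above) =====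
theorem remap_dot_bracket_spec : Claim_equal_remap_dot_bracket := by
  intro s m _ hpre
  simp only [Spec_remap_dot_bracket, remap_dot_bracket, remap_dot_bracket_alt]
  have hA := pvA_loop m s.toList [] 0 (by simpa [Pre_remap_dot_bracket] using hpre.le)
  have hB := pvB_go m.length m le_rfl s.toList 0 (by simpa [Pre_remap_dot_bracket] using hpre.le)
  rw [hA, hB]
  simp
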